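-- pv_equiv track=rewrite | github.com/Kinetics20/Python_practice_sessions_05 | Unit_tests/codewars_functions_.py | is_valid_walk
-- ===== SOURCE A (Python) =====
-- def is_valid_walk(walk):
--     if len(walk) != 10:
--         return False
--
--     north_south = 0
--     east_west = 0
--
--     for direction in walk:
--         if direction == 'n':
--             north_south += 1
--         elif direction == 's':
--             north_south -= 1
--         elif direction == 'e':
--             east_west += 1
--         elif direction == 'w':
--             east_west -= 1
--
--     return north_south == 0 and east_west == 0
-- ===== SOURCE B (Python) =====
-- OPPOSITE = {'n': 's', 's': 'n', 'e': 'w', 'w': 'e'}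
--
-- def is_valid_walk(walk):
--     # A walk returns to start iff the multiset of steps is invariant under
--     # swapping each direction with its opposite (non-directions map to themselves).
--     return len(walk) == 10 and sorted(walk) == sorted(OPPOSITE.get(d, d) for d in walk)
-- ===== Notes on version B (the rewrite author's own statement) =====
-- stated objective: alternative
-- what changed: Replaces the signed-accumulator pass with a multiset-symmetry check: map every step to its opposite direction and test that sorting makes the mapped walk equal to the original, so no counts or accumulators are kept at all.
import Mathlib
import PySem

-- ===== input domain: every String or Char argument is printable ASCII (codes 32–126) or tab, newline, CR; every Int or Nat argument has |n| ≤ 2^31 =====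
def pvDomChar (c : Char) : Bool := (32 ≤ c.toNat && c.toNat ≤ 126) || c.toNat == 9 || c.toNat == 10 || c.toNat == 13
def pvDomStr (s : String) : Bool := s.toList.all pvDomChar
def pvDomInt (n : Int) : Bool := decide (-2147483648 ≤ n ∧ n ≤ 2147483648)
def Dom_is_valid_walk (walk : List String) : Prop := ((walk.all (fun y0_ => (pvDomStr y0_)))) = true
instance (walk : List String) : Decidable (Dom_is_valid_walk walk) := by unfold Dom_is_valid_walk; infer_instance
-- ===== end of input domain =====

-- B replaces A's signed-accumulator pass with a multiset-symmetry check: sort the walk and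
-- compare with the sorted opposite-mapped walk; no counts or accumulators are kept.

-- ===== PORT A =====
def is_valid_walk (walk : List String) : Bool :=
  if walk.length ≠ 10 then false
  else
    let st := walk.foldl (fun (p : Int × Int) direction =>
      if direction = "n" then (p.1 + 1, p.2)
      else if direction = "s" then (p.1 - 1, p.2)
      else if direction = "e" then (p.1, p.2 + 1)
      else if direction = "w" then (p.1, p.2 - 1)
      else p) (0, 0)
    st.1 == 0 && st.2 == 0

-- ===== PORT B =====
def OPPOSITE : PySem.Dict String String :=
  PySem.Dict.ofList [("n", "s"), ("s", "n"), ("e", "w"), ("w", "e")]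

def is_valid_walk_alt (walk : List String) : Bool :=
  walk.length == 10 &&
    PySem.List.sorted walk (fun x => x) false
      == PySem.List.sorted (walk.map (fun d => OPPOSITE.getD d d)) (fun x => x) false

-- ===== PRECONDITION & SPEC =====
def Spec_is_valid_walk (walk : List String) (out : Bool) : Prop := out = is_valid_walk_alt walk
instance (walk : List String) (out : Bool) : Decidable (Spec_is_valid_walk walk out) := by unfold Spec_is_valid_walk; infer_instance

-- ===== CLAIM =====
def Claim_equal_is_valid_walk : Prop := ∀ (walk : List String), Dom_is_valid_walk walk → Spec_is_valid_walk walk (is_valid_walk walk)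

-- ===== LEMMAS AND PROOFS =====
theorem is_valid_walk_foldl (walk : List String) (a b : Int) :
    walk.foldl (fun (p : Int × Int) direction =>
      if direction = "n" then (p.1 + 1, p.2)
      else if direction = "s" then (p.1 - 1, p.2)
      else if direction = "e" then (p.1, p.2 + 1)
      else if direction = "w" then (p.1, p.2 - 1)
      else p) (a, b)
    = (a + (walk.count "n" : Int) - walk.count "s",
       b + (walk.count "e" : Int) - walk.count "w") := by
  induction walk generalizing a b with
  | nil => simp
  | cons d t ih =>
    by_cases hn : d = "n" <;> by_cases hs : d = "s" <;>
      by_cases he : d = "e" <;> by_cases hw : d = "w" <;>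
      simp_all <;> omega

def pvOpp (d : String) : String := OPPOSITE.getD d d

theorem OPPOSITE_eq : OPPOSITE = PySem.Dict.mk [("n", "s"), ("s", "n"), ("e", "w"), ("w", "e")] := by decide

theorem pvOpp_n : pvOpp "n" = "s" := by decide
theorem pvOpp_s : pvOpp "s" = "n" := by decide
theorem pvOpp_e : pvOpp "e" = "w" := by decide
theorem pvOpp_w : pvOpp "w" = "e" := by decide
theorem pvOpp_other (d : String) (hn : d ≠ "n") (hs : d ≠ "s") (he : d ≠ "e") (hw : d ≠ "w") :
    pvOpp d = d := by
  unfold pvOpp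
  rw [OPPOSITE_eq]
  simp [PySem.Dict.getD_eq_get?_getD, PySem.Dict.get?_mk_cons, Ne.symm hn, Ne.symm hs, Ne.symm he, Ne.symm hw, PySem.Dict.get?, PySem.Dict.empty]

theorem pvOpp_involutive : Function.Involutive pvOpp := by
  intro d
  by_cases hn : d = "n"
  · subst hn; decide
  · by_cases hs : d = "s"
    · subst hs; decide
    · by_cases he : d = "e"
      · subst he; decide
      · by_cases hw : d = "w"
        · subst hw; decide
        · rw [pvOpp_other d hn hs he hw, pvOpp_other d hn hs he hw]

theorem count_map_pvOpp (walk : List String) (x : String) :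
    (walk.map pvOpp).count x = walk.count (pvOpp x) := by
  rw [← List.count_map_of_injective walk pvOpp pvOpp_involutive.injective (pvOpp x),
      pvOpp_involutive x]

theorem perm_map_pvOpp_iff (walk : List String) :
    walk.Perm (walk.map pvOpp) ↔
      (walk.count "n" = walk.count "s" ∧ walk.count "e" = walk.count "w") := by
  rw [List.perm_iff_count]
  constructor
  · intro h
    have hn := h "n"
    have he := h "e"
    rw [count_map_pvOpp, pvOpp_n] at hn
    rw [count_map_pvOpp, pvOpp_e] at he
    exact ⟨hn, he⟩
  · rintro ⟨h1, h2⟩ x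
    rw [count_map_pvOpp]
    by_cases hn : x = "n"
    · subst hn; rw [pvOpp_n]; exact h1
    · by_cases hs : x = "s"
      · subst hs
        rw [pvOpp_s]; exact h1.symm
      · by_cases he : x = "e"
        · subst he; rw [pvOpp_e]; exact h2
        · by_cases hw : x = "w"
          · subst hw
            rw [pvOpp_w]; exact h2.symm
          · rw [pvOpp_other x hn hs he hw]

-- ===== VERDICT =====
theorem is_valid_walk_spec : Claim_equal_is_valid_walk := by
  intro walk _
  unfold Spec_is_valid_walk is_valid_walk is_valid_walk_alt
  by_cases h : walk.length = 10
  · simp only [h, ne_eq, not_true_eq_false, if_false]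
    rw [is_valid_walk_foldl]
    rw [Bool.eq_iff_iff]
    simp only [Bool.and_eq_true, beq_iff_eq, true_and]
    rw [show (fun d => OPPOSITE.getD d d) = pvOpp from rfl,
        PySem.List.sorted_id_eq_sorted_id_iff_perm]
    rw [perm_map_pvOpp_iff]
    constructor
    · rintro ⟨h1, h2⟩
      constructor <;> omega
    · rintro ⟨h1, h2⟩
      constructor <;> omega
  · simp [h]
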